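-- pv_equiv track=rewrite | github.com/devonpveller/rag-augmentation | augment_markdown.py | determine_header_level_by_context
-- ===== SOURCE A (Python) =====
-- def determine_header_level_by_context(breadcrumb, pattern_type, text):
--     """
--     Determine the appropriate level for different header patterns based on context.
--     """
--     # Date headers are typically major section dividers (level 1 or 2)
--     if pattern_type == "date":
--         return 1 if not breadcrumb else 2
--
--     # Colon headers (like "Meeting:", "Tasks:") are usually subsections
--     if pattern_type == "colon":
--         # If text contains common meeting/section keywords, treat as level 2 or 3
--         meeting_keywords = ["meeting", "discussion", "call", "update", "task", "notes", "todo"]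
--         if any(keyword in text.lower() for keyword in meeting_keywords):
--             return min(len(breadcrumb) + 1, 3) if breadcrumb else 2
--         return 2 if not breadcrumb else min(len(breadcrumb) + 1, 3)
--
--     # Numbered headers are usually subsections or list items
--     if pattern_type == "numbered":
--         return min(len(breadcrumb) + 1, 4) if breadcrumb else 2
--
--     # All caps headers are usually major sections
--     if pattern_type == "allcaps":
--         return 1 if not breadcrumb else 2
--
--     # Default for other patterns
--     return 2
-- ===== SOURCE B (Python) =====
-- def determine_header_level_by_context(breadcrumb, pattern_type, text):
--     """Closed form: clamp the context depth len(breadcrumb)+1 into the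
--     level band [lo, hi] allowed for the pattern; no branching on whether
--     there is context at all."""
--     lo = 1 if pattern_type in ("date", "allcaps") else 2
--     hi = {"colon": 3, "numbered": 4}.get(pattern_type, 2)
--     return max(lo, min(len(breadcrumb) + 1, hi))
-- ===== Notes on version B (the rewrite author's own statement) =====
-- stated objective: simpler
-- what changed: Replaces A's early-return chain, emptiness branch and dead keyword loop with one closed-form clamp: the context depth len(breadcrumb)+1 is clamped into the per-pattern level band [lo, hi]; the text argument and the empty/non-empty distinction are not inspected at all.
import Mathlib
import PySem

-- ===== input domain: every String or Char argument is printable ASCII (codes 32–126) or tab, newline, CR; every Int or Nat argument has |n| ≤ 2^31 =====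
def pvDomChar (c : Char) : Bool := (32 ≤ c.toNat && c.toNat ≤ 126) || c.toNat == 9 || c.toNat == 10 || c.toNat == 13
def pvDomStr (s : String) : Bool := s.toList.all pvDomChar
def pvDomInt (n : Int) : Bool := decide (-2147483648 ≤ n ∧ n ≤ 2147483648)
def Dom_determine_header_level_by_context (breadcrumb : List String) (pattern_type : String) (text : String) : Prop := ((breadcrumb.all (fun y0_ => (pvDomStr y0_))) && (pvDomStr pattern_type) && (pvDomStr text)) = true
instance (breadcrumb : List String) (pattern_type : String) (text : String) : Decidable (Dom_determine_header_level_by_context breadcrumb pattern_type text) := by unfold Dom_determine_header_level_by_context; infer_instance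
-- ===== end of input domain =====

-- B replaces A's early-return chain (with its dead keyword loop and emptiness branch) by one closed-form clamp of len(breadcrumb)+1 into the pattern's level band; simpler, same values.


-- ===== PORT A =====
def determine_header_level_by_context (breadcrumb : List String) (pattern_type : String) (text : String) : Int :=
  if pattern_type == "date" then
    (if breadcrumb.isEmpty then 1 else 2)
  else if pattern_type == "colon" then
    let meeting_keywords : List String := ["meeting", "discussion", "call", "update", "task", "notes", "todo"]
    if meeting_keywords.any (fun keyword => PySem.Str.isIn keyword (PySem.Str.lower text)) then
      (if !breadcrumb.isEmpty then min ((breadcrumb.length : Int) + 1) 3 else 2)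
    else
      (if breadcrumb.isEmpty then 2 else min ((breadcrumb.length : Int) + 1) 3)
  else if pattern_type == "numbered" then
    (if !breadcrumb.isEmpty then min ((breadcrumb.length : Int) + 1) 4 else 2)
  else if pattern_type == "allcaps" then
    (if breadcrumb.isEmpty then 1 else 2)
  else 2

-- ===== PORT B =====
-- Source B: lo = 1 for the major patterns else 2; hi from the {"colon":3,"numbered":4} dict with default 2;
-- result is the clamp max(lo, min(len(breadcrumb)+1, hi)).
def determine_header_level_by_context_alt (breadcrumb : List String) (pattern_type : String) (_text : String) : Int :=
  let lo : Int := if pattern_type == "date" || pattern_type == "allcaps" then 1 else 2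
  let hi : Int := PySem.Dict.getD (PySem.Dict.ofList [("colon", (3 : Int)), ("numbered", 4)]) pattern_type 2
  max lo (min ((breadcrumb.length : Int) + 1) hi)

-- ===== PRECONDITION & SPEC =====
def Spec_determine_header_level_by_context (breadcrumb : List String) (pattern_type : String) (text : String) (out : Int) : Prop := out = determine_header_level_by_context_alt breadcrumb pattern_type text
instance (breadcrumb : List String) (pattern_type : String) (text : String) (out : Int) : Decidable (Spec_determine_header_level_by_context breadcrumb pattern_type text out) := by unfold Spec_determine_header_level_by_context; infer_instance

-- ===== CLAIM (what is proved, stated in full; the proofs are below) =====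
def Claim_equal_determine_header_level_by_context : Prop := ∀ (breadcrumb : List String) (pattern_type : String) (text : String), Dom_determine_header_level_by_context breadcrumb pattern_type text → Spec_determine_header_level_by_context breadcrumb pattern_type text (determine_header_level_by_context breadcrumb pattern_type text)

-- ===== LEMMAS AND PROOFS =====

-- ===== VERDICT (by name: the statement is the Claim_ definition above) =====
theorem determine_header_level_by_context_spec : Claim_equal_determine_header_level_by_context := by
  intro breadcrumb pattern_type text _
  unfold Spec_determine_header_level_by_context determine_header_level_by_context
    determine_header_level_by_context_alt
  by_cases hd : pattern_type = "date"
  · subst hd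
    have h : PySem.Dict.getD (PySem.Dict.ofList [("colon", (3 : Int)), ("numbered", 4)]) "date" 2 = 2 := by decide
    cases breadcrumb with
    | nil => simp [h]
    | cons a t => simp [h]; omega
  · by_cases hc : pattern_type = "colon"
    · subst hc
      have h : PySem.Dict.getD (PySem.Dict.ofList [("colon", (3 : Int)), ("numbered", 4)]) "colon" 2 = 3 := by decide
      cases breadcrumb with
      | nil => simp [hd, h]
      | cons a t => simp [hd, h]; omega
    · by_cases hn : pattern_type = "numbered"
      · subst hn
        have h : PySem.Dict.getD (PySem.Dict.ofList [("colon", (3 : Int)), ("numbered", 4)]) "numbered" 2 = 4 := by decide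
        cases breadcrumb with
        | nil => simp [hd, hc, h]
        | cons a t => simp [hd, hc, h]; omega
      · by_cases ha : pattern_type = "allcaps"
        · subst ha
          have h : PySem.Dict.getD (PySem.Dict.ofList [("colon", (3 : Int)), ("numbered", 4)]) "allcaps" 2 = 2 := by decide
          cases breadcrumb with
          | nil => simp [hd, hc, hn, h]
          | cons a t => simp [hd, hc, hn, h]; omega
        · have h : PySem.Dict.getD (PySem.Dict.ofList [("colon", (3 : Int)), ("numbered", 4)]) pattern_type 2 = 2 := by
            simp [PySem.Dict.getD, PySem.Dict.get?, PySem.Dict.ofList, PySem.Dict.update,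
              PySem.Dict.empty, PySem.Dict.insert,
              beq_iff_eq, Ne.symm hc, Ne.symm hn]
          cases breadcrumb with
          | nil => simp [hd, hc, hn, ha, h]
          | cons a t => simp [hd, hc, hn, ha, h]
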